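-- pv_equiv track=rewrite | github.com/polirritmico/codesignal_solutions | numberOfClans.py | solution
-- ===== SOURCE A (Python) =====
-- def is_friendly(number: int, divisors: list[int]) -> bool:
--     prev_divisible = None
--     for divisor in divisors:
--         is_divisible = number % divisor == 0
--         prev_divisible = is_divisible if prev_divisible is None else prev_divisible
--         if is_divisible != prev_divisible:
--             return False
--     return True
--
-- def solution(divisors: list[int], k: int) -> int:
--     integers_to_check = [integer for integer in range(1, k)]
--     friendly_numbers = []
--     for idx_a in range(0, len(integers_to_check) - 1):
--         num_a = integers_to_check[idx_a]
--         if not is_friendly(num_a, divisors):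
--             continue
--         for idx_b in range(idx_a + 1, len(integers_to_check)):
--             num_b = integers_to_check[idx_b]
--             if not is_friendly(num_b, divisors):
--                 continue
--             friends = (num_a, num_b)
--             friendly_numbers.append(friends)
--     return friendly_numbers
-- ===== SOURCE B (Python) =====
-- def _is_friendly(number: int, divisors: list[int]) -> bool:
--     flags = [number % d == 0 for d in divisors]
--     return all(flags) or not any(flags)
--
-- def solution(divisors: list[int], k: int) -> int:
--     friendly = [n for n in range(1, k) if _is_friendly(n, divisors)]
--     pairs = []
--     while friendly:
--         a = friendly.pop(0)
--         for b in friendly: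
--             pairs.append((a, b))
--     return pairs
-- ===== Notes on version B (the rewrite author's own statement) =====
-- stated objective: faster
-- what changed: B computes friendliness of each number 1..k-1 exactly once (all-or-none divisibility flags) to build the friendly list, then emits all ordered pairs of that list, instead of A's nested index loops that re-test is_friendly(num_b) for every outer index.
-- outside the precondition, e.g. on solution([0], 2): A returns [], B raises ZeroDivisionError
import Mathlib
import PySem

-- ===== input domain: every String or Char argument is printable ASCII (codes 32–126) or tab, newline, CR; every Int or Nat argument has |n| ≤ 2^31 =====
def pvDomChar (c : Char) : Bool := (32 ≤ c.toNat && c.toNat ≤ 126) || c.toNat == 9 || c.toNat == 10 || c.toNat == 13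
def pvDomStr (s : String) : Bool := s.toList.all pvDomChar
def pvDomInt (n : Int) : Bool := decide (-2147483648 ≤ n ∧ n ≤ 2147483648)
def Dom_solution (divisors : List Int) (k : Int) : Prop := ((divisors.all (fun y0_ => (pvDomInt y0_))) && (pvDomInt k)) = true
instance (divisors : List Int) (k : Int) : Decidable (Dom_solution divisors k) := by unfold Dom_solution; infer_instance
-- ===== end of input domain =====

-- B computes each number's friendliness once and then pairs up the friendly list, instead of
-- A's nested index loops that re-test is_friendly for every outer index (return values only;
-- B pops from a list it built itself, no argument is mutated).

-- ===== PORT A =====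
-- is_friendly: loop over divisors carrying prev_divisible : Option Bool, early return False on mismatch
def isFriendlyLoop (number : Int) : List Int → Option Bool → Bool
  | [], _ => true
  | d :: ds, prev =>
    let isDiv : Bool := PySem.Int.mod number d == 0
    let prevD : Bool := match prev with | none => isDiv | some p => p
    if isDiv ≠ prevD then false else isFriendlyLoop number ds (some prevD)

def isFriendly (number : Int) (divisors : List Int) : Bool := isFriendlyLoop number divisors none

-- solution: integers_to_check = range(1, k); nested loops over indices; the indices used are in
-- range, so integers_to_check[idx] is getD idx 0; range(0, len-1) = List.range (len-1) and
-- range(idx_a+1, len) = List.range' (idx_a+1) (len-(idx_a+1)) (Nat truncation = Python's empty range)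
def solution (divisors : List Int) (k : Int) : List (Int × Int) :=
  let ints := PySem.List.pyRange 1 k 1
  (List.range (ints.length - 1)).foldl (fun acc ia =>
    let numA := ints.getD ia 0
    if isFriendly numA divisors = false then acc
    else
      (List.range' (ia + 1) (ints.length - (ia + 1))).foldl (fun acc2 ib =>
        let numB := ints.getD ib 0
        if isFriendly numB divisors = false then acc2
        else acc2 ++ [(numA, numB)]) acc) []

-- ===== PORT B =====
-- _is_friendly: flags = [number % d == 0 for d in divisors]; all(flags) or not any(flags)
def isFriendlyB (number : Int) (divisors : List Int) : Bool :=
  let flags := divisors.map (fun d => PySem.Int.mod number d == 0)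
  flags.all id || !flags.any id

-- while friendly: a = friendly.pop(0); for b in friendly: pairs.append((a, b))
def pairsLoop : List Int → List (Int × Int)
  | [] => []
  | a :: rest => rest.map (fun b => (a, b)) ++ pairsLoop rest

def solution_alt (divisors : List Int) (k : Int) : List (Int × Int) :=
  let friendly := (PySem.List.pyRange 1 k 1).filter (fun n => isFriendlyB n divisors)
  pairsLoop friendly

-- ===== PRECONDITION & SPEC =====
-- Pre_ excludes inputs where 'n % divisor' is evaluated with a zero divisor: A raises
-- ZeroDivisionError whenever 0 ∈ divisors and k ≥ 3; at 0 ∈ divisors and k = 2 A happens to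
-- return [] without ever calling is_friendly, but B naturally raises there too, so those
-- inputs are excluded as well (for k ≤ 1 no number is tested and both return []).
def Pre_solution (divisors : List Int) (k : Int) : Prop := (0 : Int) ∉ divisors ∨ k ≤ 1
instance (divisors : List Int) (k : Int) : Decidable (Pre_solution divisors k) := by unfold Pre_solution; infer_instance

def pvWitness_solution : List Int × Int := ([2, 4], 9)

def Spec_solution (divisors : List Int) (k : Int) (out : List (Int × Int)) : Prop := out = solution_alt divisors k
instance (divisors : List Int) (k : Int) (out : List (Int × Int)) : Decidable (Spec_solution divisors k out) := by unfold Spec_solution; infer_instance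

-- ===== CLAIM (what is proved, stated in full; the proofs are below) =====
def Claim_equal_solution : Prop := ∀ (divisors : List Int) (k : Int), Dom_solution divisors k → Pre_solution divisors k → Spec_solution divisors k (solution divisors k)

-- ===== LEMMAS AND PROOFS =====

-- A's divisor loop once prev_divisible is fixed: every later flag must equal prev
theorem isFriendlyLoop_some (number : Int) (ds : List Int) (p : Bool) :
    isFriendlyLoop number ds (some p) = ds.all (fun d => (PySem.Int.mod number d == 0) == p) := by
  induction ds with
  | nil => rfl
  | cons d ds ih =>
    simp only [isFriendlyLoop, List.all_cons]
    by_cases h : (PySem.Int.mod number d == 0) = p <;> simp [h, ih]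

-- the two friendliness predicates agree on every input
theorem isFriendly_eq (number : Int) (ds : List Int) :
    isFriendly number ds = isFriendlyB number ds := by
  cases ds with
  | nil => rfl
  | cons d ds =>
    simp only [isFriendly, isFriendlyLoop, isFriendlyB, List.map_cons, List.all_cons,
      List.any_cons, List.all_map, List.any_map, id]
    rw [if_neg (by simp), isFriendlyLoop_some]
    by_cases h : (PySem.Int.mod number d == 0) = true
    · simp [h]
    · simp only [Bool.not_eq_true] at h
      simp [h, List.all_eq_not_any_not]

-- structural form of A's nested loops on an arbitrary list
def pairsA (F : Int → Bool) : List Int → List (Int × Int)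
  | [] => []
  | x :: rest => (if F x then (rest.filter F).map (fun b => (x, b)) else []) ++ pairsA F rest

theorem drop_cons_getD (full : List Int) (j : ℕ) (b : Int) (t : List Int)
    (h : full.drop j = b :: t) : full.getD j 0 = b ∧ full.drop (j + 1) = t ∧ j < full.length := by
  have h1 : full[j]? = some b := by rw [← List.head?_drop, h]; rfl
  refine ⟨by simp [List.getD, h1], ?_, by
    by_contra hj
    simp [List.drop_eq_nil_of_le (le_of_not_gt hj)] at h⟩
  have : full.drop (j + 1) = (full.drop j).drop 1 := by rw [List.drop_drop]
  rw [this, h]; rfl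

theorem inner_fold (F : Int → Bool) (full : List Int) (na : Int) :
    ∀ (t : List Int) (j : ℕ) (acc : List (Int × Int)), full.drop j = t →
    (List.range' j t.length).foldl (fun acc2 ib =>
        let numB := full.getD ib 0
        if F numB = false then acc2 else acc2 ++ [(na, numB)]) acc
      = acc ++ (t.filter F).map (fun b => (na, b)) := by
  intro t
  induction t with
  | nil => intro j acc _; simp
  | cons b t ih =>
    intro j acc h
    obtain ⟨hb, ht, _⟩ := drop_cons_getD full j b t h
    rw [List.length_cons, List.range'_succ, List.foldl_cons]
    simp only [hb]
    by_cases hF : F b = true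
    · rw [if_neg (by simp [hF]), ih (j + 1) _ ht]
      simp [hF]
    · rw [if_pos (by simp_all), ih (j + 1) _ ht]
      simp [hF]

theorem outer_fold (F : Int → Bool) (full : List Int) :
    ∀ (t : List Int) (j : ℕ) (acc : List (Int × Int)), full.drop j = t →
    (List.range' j t.length).foldl (fun acc ia =>
        let numA := full.getD ia 0
        if F numA = false then acc
        else
          (List.range' (ia + 1) (full.length - (ia + 1))).foldl (fun acc2 ib =>
            let numB := full.getD ib 0
            if F numB = false then acc2
            else acc2 ++ [(numA, numB)]) acc) acc
      = acc ++ pairsA F t := by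
  intro t
  induction t with
  | nil => intro j acc _; simp [pairsA]
  | cons x rest ih =>
    intro j acc h
    obtain ⟨hb, ht, hj⟩ := drop_cons_getD full j x rest h
    have hlen : full.length - (j + 1) = rest.length := by
      have := List.length_drop (l := full) (i := j + 1)
      rw [ht] at this
      omega
    rw [List.length_cons, List.range'_succ, List.foldl_cons]
    simp only [hb, hlen]
    by_cases hF : F x = true
    · rw [if_neg (by simp [hF]), inner_fold F full x rest (j + 1) acc ht,
        ih (j + 1) _ ht]
      simp [pairsA, hF]
    · rw [if_pos (by simp_all), ih (j + 1) _ ht]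
      simp [pairsA, hF]

-- pairsA on the full list = pairsLoop on the filtered list
theorem pairsA_eq_pairsLoop (F : Int → Bool) (t : List Int) :
    pairsA F t = pairsLoop (t.filter F) := by
  induction t with
  | nil => rfl
  | cons x rest ih =>
    by_cases h : F x = true <;> simp [pairsA, pairsLoop, h, ih]

-- fold over range(len-1) = fold over range(len): the dropped last index contributes nothing
theorem outer_range_pred (F : Int → Bool) (full : List Int) :
    (List.range (full.length - 1)).foldl (fun acc ia =>
        let numA := full.getD ia 0
        if F numA = false then acc
        else
          (List.range' (ia + 1) (full.length - (ia + 1))).foldl (fun acc2 ib =>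
            let numB := full.getD ib 0
            if F numB = false then acc2
            else acc2 ++ [(numA, numB)]) acc) []
      = (List.range' 0 full.length).foldl (fun acc ia =>
        let numA := full.getD ia 0
        if F numA = false then acc
        else
          (List.range' (ia + 1) (full.length - (ia + 1))).foldl (fun acc2 ib =>
            let numB := full.getD ib 0
            if F numB = false then acc2
            else acc2 ++ [(numA, numB)]) acc) [] := by
  cases hl : full.length with
  | zero => rfl
  | succ n =>
    rw [List.range'_concat, List.foldl_append, List.range_eq_range']
    simp only [Nat.add_sub_cancel, Nat.zero_add, one_mul, List.foldl_cons, List.foldl_nil,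
      Nat.sub_self, List.range'_zero]
    split <;> rfl

-- ===== VERDICT (by name: the statement is the Claim_ definition above) =====
theorem solution_spec : Claim_equal_solution := by
  intro divisors k _ _
  unfold Spec_solution solution solution_alt
  simp only [isFriendly_eq]
  rw [outer_range_pred (fun n => isFriendlyB n divisors) (PySem.List.pyRange 1 k 1),
    outer_fold (fun n => isFriendlyB n divisors) (PySem.List.pyRange 1 k 1)
      (PySem.List.pyRange 1 k 1) 0 [] (by rfl),
    pairsA_eq_pairsLoop]
  rfl
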